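-- pv_equiv track=rewrite | github.com/Ben-Kerman/anki-jrp | src/pylib/output.py | insert_nbsp
-- ===== SOURCE A (Python) =====
-- from typing import List, Optional, Sequence
--
-- def insert_nbsp(val: str) -> str:
--     new_chars: List[str] = []
--     was_space: bool = False
--     for c in val:
--         if was_space:
--             was_space = False
--             if c == " ":
--                 new_chars.append(chr(0xa0))
--                 continue
--         elif c == " ":
--             was_space = True
--         new_chars.append(c)
--     return "".join(new_chars)
-- ===== SOURCE B (Python) =====
-- def insert_nbsp(val: str) -> str:
--     # single left-to-right non-overlapping substitution: the second space of
--     # each consecutive pair becomes U+00A0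
--     return val.replace("  ", " \xa0")
-- ===== Notes on version B (the rewrite author's own statement) =====
-- stated objective: idiomatic
-- what changed: A's explicit per-character loop with a was_space state flag is replaced by a single non-overlapping left-to-right str.replace of a double space by space-plus-nbsp, which pairs consecutive spaces exactly as the state machine does.
import Mathlib
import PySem

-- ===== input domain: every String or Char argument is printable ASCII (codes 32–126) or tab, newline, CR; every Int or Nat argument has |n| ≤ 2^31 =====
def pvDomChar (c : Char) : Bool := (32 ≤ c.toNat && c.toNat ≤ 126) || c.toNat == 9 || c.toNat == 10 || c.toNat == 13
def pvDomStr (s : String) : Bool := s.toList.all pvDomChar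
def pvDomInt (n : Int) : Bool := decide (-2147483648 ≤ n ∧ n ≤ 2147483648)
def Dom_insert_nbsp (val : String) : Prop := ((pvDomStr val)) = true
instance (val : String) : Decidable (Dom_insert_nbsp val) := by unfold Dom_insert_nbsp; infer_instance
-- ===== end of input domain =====

-- B replaces A's per-character state machine with a single non-overlapping
-- left-to-right substitution str.replace("  ", " \xa0") (idiomatic one-liner).


-- ===== PORT A =====
-- one step of A's loop body: state = (new_chars, was_space)
def insertNbspStep (st : List Char × Bool) (c : Char) : List Char × Bool :=
  if st.2 then
    if c = ' ' then (st.1 ++ [Char.ofNat 0xa0], false)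
    else (st.1 ++ [c], false)
  else if c = ' ' then (st.1 ++ [c], true)
  else (st.1 ++ [c], false)

def insert_nbsp (val : String) : String :=
  String.mk (val.toList.foldl insertNbspStep ([], false)).1

-- ===== PORT B =====
def insert_nbsp_alt (val : String) : String :=
  PySem.Str.replace val "  " (String.mk [' ', Char.ofNat 0xa0])

-- ===== PRECONDITION & SPEC =====
def Spec_insert_nbsp (val : String) (out : String) : Prop := out = insert_nbsp_alt val
instance (val : String) (out : String) : Decidable (Spec_insert_nbsp val out) := by unfold Spec_insert_nbsp; infer_instance

-- ===== CLAIM (what is proved, stated in full; the proofs are below) =====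
def Claim_equal_insert_nbsp : Prop := ∀ (val : String), Dom_insert_nbsp val → Spec_insert_nbsp val (insert_nbsp val)

-- ===== LEMMAS AND PROOFS =====

-- the common mathematical value: second space of each consecutive pair becomes nbsp
def nbspRep : List Char → List Char
  | [] => []
  | ' ' :: ' ' :: t => ' ' :: Char.ofNat 0xa0 :: nbspRep t
  | c :: t => c :: nbspRep t

theorem step_nonspace (x : List Char) (d : Char) (hd : d ≠ ' ') (t : List Char) :
    List.foldl insertNbspStep (x, true) (d :: t) =
      List.foldl insertNbspStep (x, false) (d :: t) := by
  simp [List.foldl_cons, insertNbspStep, hd]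

theorem nbspRep_cons (c : Char) (t : List Char)
    (h : ¬(c = ' ' ∧ t.head? = some ' ')) : nbspRep (c :: t) = c :: nbspRep t := by
  rw [nbspRep.eq_def]
  split
  · simp_all
  · next heq => exact absurd (by simp_all : c = ' ' ∧ t.head? = some ' ') h
  · next heq => injection heq with h1 h2; subst h1; subst h2; rfl

-- A's fold computes nbspRep
theorem foldl_insertNbspStep (l : List Char) : ∀ (acc : List Char),
    (l.foldl insertNbspStep (acc, false)).1 = acc ++ nbspRep l := by
  induction l using nbspRep.induct with
  | case1 => intro acc; simp [nbspRep]
  | case2 t ih =>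
      intro acc
      rw [List.foldl_cons, List.foldl_cons,
        show insertNbspStep (acc, false) ' ' = (acc ++ [' '], true) by
          simp [insertNbspStep],
        show insertNbspStep (acc ++ [' '], true) ' ' =
            (acc ++ [' '] ++ [Char.ofNat 0xa0], false) by simp [insertNbspStep],
        ih]
      simp [nbspRep]
  | case3 c t h ih =>
      intro acc
      by_cases hc : c = ' '
      · subst hc
        rw [List.foldl_cons,
          show insertNbspStep (acc, false) ' ' = (acc ++ [' '], true) by
            simp [insertNbspStep]]
        match t, h, ih with
        | [], _, _ => rw [nbspRep_cons ' ' [] (by simp)]; simp [nbspRep]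
        | d :: t', h, ih =>
            have hd : d ≠ ' ' := fun hd => h t' rfl (by rw [hd])
            rw [step_nonspace _ _ hd, ih, nbspRep_cons ' ' (d :: t') (by simp [hd])]
            simp
      · rw [List.foldl_cons,
          show insertNbspStep (acc, false) c = (acc ++ [c], false) by
            simp [insertNbspStep, hc],
          ih, nbspRep_cons c t (by simp [hc])]
        simp

-- B's replace-scan computes nbspRep
theorem replace_go_nbsp (fuel : Nat) : ∀ (l acc : List Char), l.length ≤ fuel →
    PySem.Chars.replace.go [' ', ' '] [' ', Char.ofNat 0xa0] fuel l acc =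
      acc.reverse ++ nbspRep l := by
  induction fuel with
  | zero =>
      intro l acc hl
      have : l = [] := List.eq_nil_of_length_eq_zero (Nat.le_zero.mp hl)
      subst this
      simp [PySem.Chars.replace.go, nbspRep]
  | succ n ih =>
      intro l acc hl
      match l with
      | [] => simp [PySem.Chars.replace.go, nbspRep]
      | c :: t =>
          rw [PySem.Chars.replace.go]
          by_cases hp : [' ', ' '].isPrefixOf (c :: t) = true
          · rw [if_pos hp]
            match t, hp, hl with
            | [], hp, _ => simp [List.isPrefixOf] at hp
            | d :: t', hp, hl =>
                have hcd : ' ' = c ∧ ' ' = d := by simpa [List.isPrefixOf] using hp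
                obtain ⟨hc, hd⟩ := hcd
                rw [← hc, ← hd]
                have hlen : t'.length ≤ n := by simp at hl; omega
                simp only [List.length_cons, List.length_nil, List.drop_succ_cons,
                  List.drop_zero]
                rw [ih t' _ hlen]
                simp [nbspRep]
          · rw [if_neg hp]
            have hlen : t.length ≤ n := by simp at hl; omega
            have hns : ¬(c = ' ' ∧ t.head? = some ' ') := by
              rintro ⟨h1, h2⟩
              subst h1
              cases t with
              | nil => simp at h2
              | cons d t' =>
                  simp at h2
                  subst h2
                  exact hp (by simp [List.isPrefixOf])
            rw [ih t _ hlen, nbspRep_cons c t hns]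
            simp

-- ===== VERDICT (by name: the statement is the Claim_ definition above) =====
theorem insert_nbsp_spec : Claim_equal_insert_nbsp := by
  intro val _
  unfold Spec_insert_nbsp insert_nbsp insert_nbsp_alt PySem.Str.replace
  rw [foldl_insertNbspStep val.toList []]
  rw [show ("  ".toList) = ([' ', ' '] : List Char) from rfl,
    show (String.mk [' ', Char.ofNat 0xa0]).toList = [' ', Char.ofNat 0xa0] from rfl]
  simp only [PySem.Chars.replace]
  rw [if_neg (by simp), replace_go_nbsp val.toList.length val.toList [] le_rfl]
  rfl
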